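-- pv_equiv track=rewrite | github.com/Domik44/BP | src/python_scripts/gedcom_parser_v3.py | alias_month
-- ===== SOURCE A (Python) =====
-- def alias_month(string):
--     dictionary = {
--         'JAN': '01',
--         'FEB': '02',
--         'MAR': '03',
--         'APR': '04',
--         'MAY': '05',
--         'JUN': '06',
--         'JUL': '07',
--         'AUG': '08',
--         'SEP': '09',
--         'OCT': '10',
--         'NOV': '11',
--         'DEC': '12',
--     }
--     for key, val in dictionary.items():
--         if key in string:
--             string = string.replace(key, val)
--
--     splitted = string.split(' ')
--     newStr = ''
--     for s in splitted:
--         if len(s) == 1 and s.isnumeric():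
--             s = '0' + s
--         newStr += s + '. '
--
--     return newStr.strip().strip('.')
-- ===== SOURCE B (Python) =====
-- def alias_month(string):
--     months = {
--         'JAN': '01', 'FEB': '02', 'MAR': '03', 'APR': '04',
--         'MAY': '05', 'JUN': '06', 'JUL': '07', 'AUG': '08',
--         'SEP': '09', 'OCT': '10', 'NOV': '11', 'DEC': '12',
--     }
--
--     def sub(tok):
--         # single left-to-right scan replacing any 3-char month code
--         out = []
--         i = 0
--         while i < len(tok):
--             hit = months.get(tok[i:i + 3])
--             if hit is not None:
--                 out.append(hit)
--                 i += 3
--             else: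
--                 out.append(tok[i])
--                 i += 1
--         return ''.join(out)
--
--     parts = []
--     for tok in string.split(' '):
--         t = sub(tok)
--         if len(t) == 1 and t.isdigit():
--             t = '0' + t
--         parts.append(t)
--     return '. '.join(parts).lstrip().strip('.')
-- ===== Notes on version B (the rewrite author's own statement) =====
-- stated objective: alternative
-- what changed: B replaces A's twelve sequential full-string str.replace passes with a single left-to-right scan that looks each 3-char window up in the month dict, fuses it with the per-token zero-padding pass over string.split(' '), and produces the result with '. '.join + lstrip + strip('.') instead of A's trailing-separator accumulation plus strip().strip('.').
import Mathlib
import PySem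

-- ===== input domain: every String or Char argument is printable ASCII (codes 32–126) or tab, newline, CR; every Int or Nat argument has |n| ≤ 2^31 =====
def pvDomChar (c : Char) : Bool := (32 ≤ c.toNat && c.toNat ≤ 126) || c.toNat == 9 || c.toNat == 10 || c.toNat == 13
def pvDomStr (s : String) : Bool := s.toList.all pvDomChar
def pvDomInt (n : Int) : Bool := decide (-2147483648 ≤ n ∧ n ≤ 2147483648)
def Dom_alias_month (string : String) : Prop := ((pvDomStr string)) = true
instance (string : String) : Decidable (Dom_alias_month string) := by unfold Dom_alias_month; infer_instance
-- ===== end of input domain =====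

-- B replaces A's twelve sequential full-string .replace passes by a single left-to-right
-- scan with a dict lookup on each 3-char window, fused with the token zero-padding pass,
-- and closes with '. '.join + lstrip + strip('.') instead of A's trailing-separator fold.

-- ===== PORT A =====
-- the dict literal of A: distinct keys, items() iterates in insertion order
def monthPairs : List (List Char × List Char) :=
  [(['J','A','N'], ['0','1']), (['F','E','B'], ['0','2']), (['M','A','R'], ['0','3']),
   (['A','P','R'], ['0','4']), (['M','A','Y'], ['0','5']), (['J','U','N'], ['0','6']),
   (['J','U','L'], ['0','7']), (['A','U','G'], ['0','8']), (['S','E','P'], ['0','9']),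
   (['O','C','T'], ['1','0']), (['N','O','V'], ['1','1']), (['D','E','C'], ['1','2'])]

-- s.isnumeric(): on the printable-ASCII domain isnumeric coincides with isdigit (exact there)
def pyIsnumeric (s : List Char) : Bool := PySem.Chars.strIsdigit s

def alias_month (string : String) : String :=
  -- for key, val in dictionary.items(): if key in string: string = string.replace(key, val)
  let s1 := monthPairs.foldl
    (fun s kv => if PySem.Chars.isIn kv.1 s then PySem.Chars.replace s kv.1 kv.2 else s)
    string.toList
  -- splitted = string.split(' ')
  let splitted := PySem.Chars.splitOn s1 [' ']
  -- for s in splitted: if len(s) == 1 and s.isnumeric(): s = '0' + s; newStr += s + '. '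
  let newStr := splitted.foldl
    (fun acc s => acc ++ (if s.length == 1 && pyIsnumeric s then '0' :: s else s) ++ ['.', ' '])
    []
  -- return newStr.strip().strip('.')
  String.ofList (PySem.Chars.stripChars (PySem.Chars.strip newStr) ['.'])

-- ===== PORT B =====
-- months.get(tok[i:i+3]) — the dict lookup, written out as a decision chain (exact)
def monthVal (c1 c2 c3 : Char) : Option (List Char) :=
  if c1 = 'J' ∧ c2 = 'A' ∧ c3 = 'N' then some ['0','1']
  else if c1 = 'F' ∧ c2 = 'E' ∧ c3 = 'B' then some ['0','2']
  else if c1 = 'M' ∧ c2 = 'A' ∧ c3 = 'R' then some ['0','3']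
  else if c1 = 'A' ∧ c2 = 'P' ∧ c3 = 'R' then some ['0','4']
  else if c1 = 'M' ∧ c2 = 'A' ∧ c3 = 'Y' then some ['0','5']
  else if c1 = 'J' ∧ c2 = 'U' ∧ c3 = 'N' then some ['0','6']
  else if c1 = 'J' ∧ c2 = 'U' ∧ c3 = 'L' then some ['0','7']
  else if c1 = 'A' ∧ c2 = 'U' ∧ c3 = 'G' then some ['0','8']
  else if c1 = 'S' ∧ c2 = 'E' ∧ c3 = 'P' then some ['0','9']
  else if c1 = 'O' ∧ c2 = 'C' ∧ c3 = 'T' then some ['1','0']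
  else if c1 = 'N' ∧ c2 = 'O' ∧ c3 = 'V' then some ['1','1']
  else if c1 = 'D' ∧ c2 = 'E' ∧ c3 = 'C' then some ['1','2']
  else none

-- sub(tok): the while-loop scan — on a hit emit the value and jump 3, else emit one char
def scanTok : List Char → List Char
  | c1 :: c2 :: c3 :: rest =>
    match monthVal c1 c2 c3 with
    | some v => v ++ scanTok rest
    | none => c1 :: scanTok (c2 :: c3 :: rest)
  | l => l

def alias_month_alt (string : String) : String :=
  -- for tok in string.split(' '): t = sub(tok); pad; parts.append(t)
  let parts := (PySem.Chars.splitOn string.toList [' ']).map (fun tok =>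
    let t := scanTok tok
    if t.length == 1 && PySem.Chars.strIsdigit t then '0' :: t else t)
  -- return '. '.join(parts).lstrip().strip('.')
  String.ofList (PySem.Chars.stripChars (PySem.Chars.lstrip (PySem.Chars.join ['.', ' '] parts)) ['.'])

-- ===== PRECONDITION & SPEC =====
def Spec_alias_month (string : String) (out : String) : Prop := out = alias_month_alt string
instance (string : String) (out : String) : Decidable (Spec_alias_month string out) := by unfold Spec_alias_month; infer_instance

-- ===== CLAIM (what is proved, stated in full; the proofs are below) =====
def Claim_equal_alias_month : Prop := ∀ (string : String), Dom_alias_month string → Spec_alias_month string (alias_month string)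

-- ===== LEMMAS AND PROOFS =====

-- structural model of Python's str.replace (old ≠ []) used to reason about Chars.replace
def repl (old new : List Char) : List Char → List Char
  | [] => []
  | c :: t =>
    if old.isPrefixOf (c :: t) then new ++ repl old new (List.drop (old.length - 1) t)
    else c :: repl old new t
termination_by l => l.length
decreasing_by all_goals (simp; try omega)

lemma go_eq_repl (old new : List Char) (hold : old ≠ []) :
    ∀ (fuel : Nat) (l acc : List Char), l.length ≤ fuel →
      PySem.Chars.replace.go old new fuel l acc = acc.reverse ++ repl old new l := by
  intro fuel
  induction fuel with
  | zero =>
    intro l acc hl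
    have : l = [] := by cases l <;> simp_all
    subst this
    rw [PySem.Chars.replace.go.eq_def]
    simp [repl]
  | succ f ih =>
    intro l acc hl
    cases l with
    | nil => rw [PySem.Chars.replace.go.eq_def]; simp [repl]
    | cons c t =>
      rw [PySem.Chars.replace.go.eq_def]
      by_cases hp : old.isPrefixOf (c :: t)
      · simp only [hp, if_true]
        have hdrop : List.drop old.length (c :: t) = List.drop (old.length - 1) t := by
          cases old with
          | nil => simp_all
          | cons o os => simp
        rw [hdrop, ih _ _ (by simp at hl ⊢; omega)]
        rw [repl]
        simp [hp]
      · simp only [hp, if_false, Bool.false_eq_true]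
        rw [ih _ _ (by simp at hl ⊢; omega)]
        rw [repl]
        simp [hp]

lemma replace_eq_repl (old new s : List Char) (hold : old ≠ []) :
    PySem.Chars.replace s old new = repl old new s := by
  rw [PySem.Chars.replace]
  have : old.isEmpty = false := by cases old <;> simp_all
  rw [this]
  simp [go_eq_repl old new hold s.length s [] (le_refl _)]

lemma repl_of_not_infix (old new : List Char) : ∀ (s : List Char), ¬ old <:+: s →
    repl old new s = s := by
  intro s
  induction s with
  | nil => intro h; rw [repl]
  | cons c t ih =>
    intro h
    rw [repl]
    have hp : old.isPrefixOf (c :: t) = false := by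
      by_contra hc
      simp only [Bool.not_eq_false, List.isPrefixOf_iff_prefix] at hc
      exact h hc.isInfix
    rw [hp]
    simp
    exact ih (fun hi => h (hi.trans (List.suffix_cons c t).isInfix))

-- one fold step of A equals an unguarded repl step
def stepR (s : List Char) (kv : List Char × List Char) : List Char := repl kv.1 kv.2 s

def chainR (s : List Char) : List Char := monthPairs.foldl stepR s

lemma chainA_eq_chainR (s : List Char) :
    monthPairs.foldl
      (fun s kv => if PySem.Chars.isIn kv.1 s then PySem.Chars.replace s kv.1 kv.2 else s)
      s = chainR s := by
  apply PySem.List.foldl_congr_mem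
  intro acc kv hkv
  by_cases hin : PySem.Chars.isIn kv.1 acc
  · rw [if_pos hin, stepR]
    exact replace_eq_repl _ _ _ (by fin_cases hkv <;> simp)
  · rw [if_neg hin, stepR]
    have : ¬ kv.1 <:+: acc := by
      rw [← PySem.Chars.isIn_iff_infix]; simpa using hin
    exact (repl_of_not_infix _ _ _ this).symm

-- a key that cannot match in the first three positions passes a 3-char prefix through
lemma repl_pass (a b cc : Char) (v : List Char) (k1 k2 k3 : Char) (u : List Char)
    (h0 : ¬(a = k1 ∧ b = k2 ∧ cc = k3)) (h1 : ¬(a = k2 ∧ b = k3)) (h2 : a ≠ k3) :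
    repl [a,b,cc] v (k1 :: k2 :: k3 :: u) = k1 :: k2 :: k3 :: repl [a,b,cc] v u := by
  rw [repl, repl, repl]
  have p1 : [a,b,cc].isPrefixOf (k1 :: k2 :: k3 :: u) = false := by
    simp [List.isPrefixOf]; intro ha hb; exact fun hcc => h0 ⟨ha, hb, hcc⟩
  have p2 : [a,b,cc].isPrefixOf (k2 :: k3 :: u) = false := by
    simp [List.isPrefixOf]; intro ha hb; exact absurd ⟨ha, hb⟩ h1
  have p3 : [a,b,cc].isPrefixOf (k3 :: u) = false := by
    simp [List.isPrefixOf]; intro ha; exact absurd ha h2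
  rw [p1, p2, p3]; simp

-- a key whose head differs from both chars passes a 2-char prefix through
lemma repl_pass2 (a b cc : Char) (v : List Char) (v0 v1 : Char) (w : List Char)
    (h0 : a ≠ v0) (h1 : a ≠ v1) :
    repl [a,b,cc] v (v0 :: v1 :: w) = v0 :: v1 :: repl [a,b,cc] v w := by
  rw [repl, repl]
  have p1 : [a,b,cc].isPrefixOf (v0 :: v1 :: w) = false := by
    simp [List.isPrefixOf]; intro ha; exact absurd ha h0
  have p2 : [a,b,cc].isPrefixOf (v1 :: w) = false := by
    simp [List.isPrefixOf]; intro ha; exact absurd ha h1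
  rw [p1, p2]; simp

lemma foldl_fix (p : List Char) (ks : List (List Char × List Char))
    (h : ∀ kv ∈ ks, ∀ u, repl kv.1 kv.2 (p ++ u) = p ++ repl kv.1 kv.2 u) :
    ∀ u, ks.foldl stepR (p ++ u) = p ++ ks.foldl stepR u := by
  induction ks with
  | nil => intro u; simp
  | cons kv ks ih =>
    intro u
    simp only [List.foldl_cons]
    have h1 : stepR (p ++ u) kv = p ++ stepR u kv := h kv (by simp) u
    rw [h1]
    exact ih (fun kv' hkv' u' => h kv' (by simp [hkv']) u') _

-- a replace step cannot create a key occurrence at the front (values are digits, keys letters)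
lemma nkp_one (a b cc : Char) (v0 v1 x y z c : Char) (u : List Char)
    (hy0 : y ≠ v0) (hz0 : z ≠ v0)
    (hnkp : ¬ [x,y,z] <+: c :: u) :
    ¬ [x,y,z] <+: c :: repl [a,b,cc] [v0,v1] u := by
  cases u with
  | nil => rw [repl]; simp
  | cons d u' =>
    rw [repl]
    by_cases hm : [a,b,cc].isPrefixOf (d :: u')
    · rw [if_pos hm]
      simp only [List.cons_prefix_cons, List.cons_append]
      rintro ⟨-, hy, -⟩; exact hy0 hy
    · rw [if_neg hm]
      cases u' with
      | nil => rw [repl]; simp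
      | cons e u'' =>
        by_cases hm2 : [a,b,cc].isPrefixOf (e :: u'')
        · rw [repl, if_pos hm2]
          simp only [List.cons_prefix_cons, List.cons_append]
          rintro ⟨-, -, hz, -⟩; exact hz0 hz
        · rw [repl, if_neg hm2]
          simp only [List.cons_prefix_cons] at hnkp ⊢
          rintro ⟨hx, hy, hz, -⟩
          exact hnkp ⟨hx, hy, hz, by simp⟩

lemma nkp_step (c : Char) (u : List Char) (kv : List Char × List Char) (hkv : kv ∈ monthPairs)
    (h : ∀ kv' ∈ monthPairs, ¬ kv'.1 <+: c :: u) :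
    ∀ kv' ∈ monthPairs, ¬ kv'.1 <+: c :: stepR u kv := by
  intro kv' hkv'
  have h2 : ¬ kv'.1 <+: c :: u := h kv' hkv'
  fin_cases hkv <;> fin_cases hkv' <;>
    exact nkp_one _ _ _ _ _ _ _ _ _ _ (by decide) (by decide) h2

lemma foldl_cons (c : Char) :
    ∀ (ks : List (List Char × List Char)), (∀ kv ∈ ks, kv ∈ monthPairs) →
    ∀ u, (∀ kv ∈ monthPairs, ¬ kv.1 <+: c :: u) →
      ks.foldl stepR (c :: u) = c :: ks.foldl stepR u := by
  intro ks
  induction ks with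
  | nil => intro _ u _; simp
  | cons kv ks ih =>
    intro hsub u hnkp
    simp only [List.foldl_cons]
    have h1 : stepR (c :: u) kv = c :: stepR u kv := by
      have hp : kv.1.isPrefixOf (c :: u) = false := by
        by_contra hc
        simp only [Bool.not_eq_false, List.isPrefixOf_iff_prefix] at hc
        exact hnkp kv (hsub kv (by simp)) hc
      simp only [stepR]
      rw [repl, hp]
      simp
    rw [h1]
    exact ih (fun kv' hkv' => hsub kv' (by simp [hkv'])) (stepR u kv)
      (nkp_step c u kv (hsub kv (by simp)) hnkp)

lemma monthVal_some_mem (c1 c2 c3 : Char) (v : List Char)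
    (h : monthVal c1 c2 c3 = some v) : ([c1,c2,c3], v) ∈ monthPairs := by
  rw [monthVal] at h
  by_cases h1 : c1 = 'J' ∧ c2 = 'A' ∧ c3 = 'N'
  · rw [if_pos h1] at h
    obtain ⟨ha,hb,hc⟩ := h1; subst ha; subst hb; subst hc
    injection h with h; subst h; decide
  rw [if_neg h1] at h
  by_cases h2 : c1 = 'F' ∧ c2 = 'E' ∧ c3 = 'B'
  · rw [if_pos h2] at h
    obtain ⟨ha,hb,hc⟩ := h2; subst ha; subst hb; subst hc
    injection h with h; subst h; decide
  rw [if_neg h2] at h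
  by_cases h3 : c1 = 'M' ∧ c2 = 'A' ∧ c3 = 'R'
  · rw [if_pos h3] at h
    obtain ⟨ha,hb,hc⟩ := h3; subst ha; subst hb; subst hc
    injection h with h; subst h; decide
  rw [if_neg h3] at h
  by_cases h4 : c1 = 'A' ∧ c2 = 'P' ∧ c3 = 'R'
  · rw [if_pos h4] at h
    obtain ⟨ha,hb,hc⟩ := h4; subst ha; subst hb; subst hc
    injection h with h; subst h; decide
  rw [if_neg h4] at h
  by_cases h5 : c1 = 'M' ∧ c2 = 'A' ∧ c3 = 'Y'
  · rw [if_pos h5] at h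
    obtain ⟨ha,hb,hc⟩ := h5; subst ha; subst hb; subst hc
    injection h with h; subst h; decide
  rw [if_neg h5] at h
  by_cases h6 : c1 = 'J' ∧ c2 = 'U' ∧ c3 = 'N'
  · rw [if_pos h6] at h
    obtain ⟨ha,hb,hc⟩ := h6; subst ha; subst hb; subst hc
    injection h with h; subst h; decide
  rw [if_neg h6] at h
  by_cases h7 : c1 = 'J' ∧ c2 = 'U' ∧ c3 = 'L'
  · rw [if_pos h7] at h
    obtain ⟨ha,hb,hc⟩ := h7; subst ha; subst hb; subst hc
    injection h with h; subst h; decide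
  rw [if_neg h7] at h
  by_cases h8 : c1 = 'A' ∧ c2 = 'U' ∧ c3 = 'G'
  · rw [if_pos h8] at h
    obtain ⟨ha,hb,hc⟩ := h8; subst ha; subst hb; subst hc
    injection h with h; subst h; decide
  rw [if_neg h8] at h
  by_cases h9 : c1 = 'S' ∧ c2 = 'E' ∧ c3 = 'P'
  · rw [if_pos h9] at h
    obtain ⟨ha,hb,hc⟩ := h9; subst ha; subst hb; subst hc
    injection h with h; subst h; decide
  rw [if_neg h9] at h
  by_cases h10 : c1 = 'O' ∧ c2 = 'C' ∧ c3 = 'T'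
  · rw [if_pos h10] at h
    obtain ⟨ha,hb,hc⟩ := h10; subst ha; subst hb; subst hc
    injection h with h; subst h; decide
  rw [if_neg h10] at h
  by_cases h11 : c1 = 'N' ∧ c2 = 'O' ∧ c3 = 'V'
  · rw [if_pos h11] at h
    obtain ⟨ha,hb,hc⟩ := h11; subst ha; subst hb; subst hc
    injection h with h; subst h; decide
  rw [if_neg h11] at h
  by_cases h12 : c1 = 'D' ∧ c2 = 'E' ∧ c3 = 'C'
  · rw [if_pos h12] at h
    obtain ⟨ha,hb,hc⟩ := h12; subst ha; subst hb; subst hc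
    injection h with h; subst h; decide
  rw [if_neg h12] at h
  simp at h

lemma repl_nil (old new : List Char) : repl old new [] = [] := by rw [repl]

lemma chainR_nil : chainR [] = [] := by
  simp [chainR, monthPairs, stepR, repl_nil]

lemma chain_key_gen (k1 k2 k3 v0 v1 : Char) (pre post : List (List Char × List Char))
    (hsplit : monthPairs = pre ++ ([k1,k2,k3],[v0,v1]) :: post)
    (hpre : ∀ kv ∈ pre, ∀ w, repl kv.1 kv.2 (k1::k2::k3::w) = k1::k2::k3::repl kv.1 kv.2 w)
    (hpost : ∀ kv ∈ post, ∀ w, repl kv.1 kv.2 (v0::v1::w) = v0::v1::repl kv.1 kv.2 w)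
    (u : List Char) :
    chainR (k1::k2::k3::u) = v0::v1::chainR u := by
  rw [chainR, chainR, hsplit]
  rw [List.foldl_append, List.foldl_append, List.foldl_cons, List.foldl_cons]
  have e1 : List.foldl stepR (k1::k2::k3::u) pre = k1::k2::k3::List.foldl stepR u pre := by
    have := foldl_fix [k1,k2,k3] pre (fun kv hkv w => by simpa using hpre kv hkv w) u
    simpa using this
  rw [e1]
  have e2 : stepR (k1::k2::k3::(List.foldl stepR u pre)) ([k1,k2,k3],[v0,v1])
      = v0::v1::stepR (List.foldl stepR u pre) ([k1,k2,k3],[v0,v1]) := by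
    simp only [stepR]
    rw [repl]
    have hp : [k1,k2,k3].isPrefixOf (k1::k2::k3::(List.foldl stepR u pre)) = true := by
      simp [List.isPrefixOf]
    rw [hp]
    simp
  rw [e2]
  have e3 := foldl_fix [v0,v1] post
    (fun kv hkv w => by simpa using hpost kv hkv w)
    (stepR (List.foldl stepR u pre) ([k1,k2,k3],[v0,v1]))
  simpa using e3

lemma chain_key_JAN (u : List Char) :
    chainR ('J'::'A'::'N'::u) = '0'::'1'::chainR u :=
  chain_key_gen 'J' 'A' 'N' '0' '1'
    []
    [(['F','E','B'],['0','2']), (['M','A','R'],['0','3']), (['A','P','R'],['0','4']), (['M','A','Y'],['0','5']), (['J','U','N'],['0','6']), (['J','U','L'],['0','7']), (['A','U','G'],['0','8']), (['S','E','P'],['0','9']), (['O','C','T'],['1','0']), (['N','O','V'],['1','1']), (['D','E','C'],['1','2'])]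
    rfl
    (by intro kv hkv w; fin_cases hkv <;>
      exact repl_pass _ _ _ _ _ _ _ _ (by decide) (by decide) (by decide))
    (by intro kv hkv w; fin_cases hkv <;>
      exact repl_pass2 _ _ _ _ _ _ _ (by decide) (by decide))
    u

lemma chain_key_FEB (u : List Char) :
    chainR ('F'::'E'::'B'::u) = '0'::'2'::chainR u :=
  chain_key_gen 'F' 'E' 'B' '0' '2'
    [(['J','A','N'],['0','1'])]
    [(['M','A','R'],['0','3']), (['A','P','R'],['0','4']), (['M','A','Y'],['0','5']), (['J','U','N'],['0','6']), (['J','U','L'],['0','7']), (['A','U','G'],['0','8']), (['S','E','P'],['0','9']), (['O','C','T'],['1','0']), (['N','O','V'],['1','1']), (['D','E','C'],['1','2'])]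
    rfl
    (by intro kv hkv w; fin_cases hkv <;>
      exact repl_pass _ _ _ _ _ _ _ _ (by decide) (by decide) (by decide))
    (by intro kv hkv w; fin_cases hkv <;>
      exact repl_pass2 _ _ _ _ _ _ _ (by decide) (by decide))
    u

lemma chain_key_MAR (u : List Char) :
    chainR ('M'::'A'::'R'::u) = '0'::'3'::chainR u :=
  chain_key_gen 'M' 'A' 'R' '0' '3'
    [(['J','A','N'],['0','1']), (['F','E','B'],['0','2'])]
    [(['A','P','R'],['0','4']), (['M','A','Y'],['0','5']), (['J','U','N'],['0','6']), (['J','U','L'],['0','7']), (['A','U','G'],['0','8']), (['S','E','P'],['0','9']), (['O','C','T'],['1','0']), (['N','O','V'],['1','1']), (['D','E','C'],['1','2'])]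
    rfl
    (by intro kv hkv w; fin_cases hkv <;>
      exact repl_pass _ _ _ _ _ _ _ _ (by decide) (by decide) (by decide))
    (by intro kv hkv w; fin_cases hkv <;>
      exact repl_pass2 _ _ _ _ _ _ _ (by decide) (by decide))
    u

lemma chain_key_APR (u : List Char) :
    chainR ('A'::'P'::'R'::u) = '0'::'4'::chainR u :=
  chain_key_gen 'A' 'P' 'R' '0' '4'
    [(['J','A','N'],['0','1']), (['F','E','B'],['0','2']), (['M','A','R'],['0','3'])]
    [(['M','A','Y'],['0','5']), (['J','U','N'],['0','6']), (['J','U','L'],['0','7']), (['A','U','G'],['0','8']), (['S','E','P'],['0','9']), (['O','C','T'],['1','0']), (['N','O','V'],['1','1']), (['D','E','C'],['1','2'])]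
    rfl
    (by intro kv hkv w; fin_cases hkv <;>
      exact repl_pass _ _ _ _ _ _ _ _ (by decide) (by decide) (by decide))
    (by intro kv hkv w; fin_cases hkv <;>
      exact repl_pass2 _ _ _ _ _ _ _ (by decide) (by decide))
    u

lemma chain_key_MAY (u : List Char) :
    chainR ('M'::'A'::'Y'::u) = '0'::'5'::chainR u :=
  chain_key_gen 'M' 'A' 'Y' '0' '5'
    [(['J','A','N'],['0','1']), (['F','E','B'],['0','2']), (['M','A','R'],['0','3']), (['A','P','R'],['0','4'])]
    [(['J','U','N'],['0','6']), (['J','U','L'],['0','7']), (['A','U','G'],['0','8']), (['S','E','P'],['0','9']), (['O','C','T'],['1','0']), (['N','O','V'],['1','1']), (['D','E','C'],['1','2'])]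
    rfl
    (by intro kv hkv w; fin_cases hkv <;>
      exact repl_pass _ _ _ _ _ _ _ _ (by decide) (by decide) (by decide))
    (by intro kv hkv w; fin_cases hkv <;>
      exact repl_pass2 _ _ _ _ _ _ _ (by decide) (by decide))
    u

lemma chain_key_JUN (u : List Char) :
    chainR ('J'::'U'::'N'::u) = '0'::'6'::chainR u :=
  chain_key_gen 'J' 'U' 'N' '0' '6'
    [(['J','A','N'],['0','1']), (['F','E','B'],['0','2']), (['M','A','R'],['0','3']), (['A','P','R'],['0','4']), (['M','A','Y'],['0','5'])]
    [(['J','U','L'],['0','7']), (['A','U','G'],['0','8']), (['S','E','P'],['0','9']), (['O','C','T'],['1','0']), (['N','O','V'],['1','1']), (['D','E','C'],['1','2'])]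
    rfl
    (by intro kv hkv w; fin_cases hkv <;>
      exact repl_pass _ _ _ _ _ _ _ _ (by decide) (by decide) (by decide))
    (by intro kv hkv w; fin_cases hkv <;>
      exact repl_pass2 _ _ _ _ _ _ _ (by decide) (by decide))
    u

lemma chain_key_JUL (u : List Char) :
    chainR ('J'::'U'::'L'::u) = '0'::'7'::chainR u :=
  chain_key_gen 'J' 'U' 'L' '0' '7'
    [(['J','A','N'],['0','1']), (['F','E','B'],['0','2']), (['M','A','R'],['0','3']), (['A','P','R'],['0','4']), (['M','A','Y'],['0','5']), (['J','U','N'],['0','6'])]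
    [(['A','U','G'],['0','8']), (['S','E','P'],['0','9']), (['O','C','T'],['1','0']), (['N','O','V'],['1','1']), (['D','E','C'],['1','2'])]
    rfl
    (by intro kv hkv w; fin_cases hkv <;>
      exact repl_pass _ _ _ _ _ _ _ _ (by decide) (by decide) (by decide))
    (by intro kv hkv w; fin_cases hkv <;>
      exact repl_pass2 _ _ _ _ _ _ _ (by decide) (by decide))
    u

lemma chain_key_AUG (u : List Char) :
    chainR ('A'::'U'::'G'::u) = '0'::'8'::chainR u :=
  chain_key_gen 'A' 'U' 'G' '0' '8'
    [(['J','A','N'],['0','1']), (['F','E','B'],['0','2']), (['M','A','R'],['0','3']), (['A','P','R'],['0','4']), (['M','A','Y'],['0','5']), (['J','U','N'],['0','6']), (['J','U','L'],['0','7'])]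
    [(['S','E','P'],['0','9']), (['O','C','T'],['1','0']), (['N','O','V'],['1','1']), (['D','E','C'],['1','2'])]
    rfl
    (by intro kv hkv w; fin_cases hkv <;>
      exact repl_pass _ _ _ _ _ _ _ _ (by decide) (by decide) (by decide))
    (by intro kv hkv w; fin_cases hkv <;>
      exact repl_pass2 _ _ _ _ _ _ _ (by decide) (by decide))
    u

lemma chain_key_SEP (u : List Char) :
    chainR ('S'::'E'::'P'::u) = '0'::'9'::chainR u :=
  chain_key_gen 'S' 'E' 'P' '0' '9'
    [(['J','A','N'],['0','1']), (['F','E','B'],['0','2']), (['M','A','R'],['0','3']), (['A','P','R'],['0','4']), (['M','A','Y'],['0','5']), (['J','U','N'],['0','6']), (['J','U','L'],['0','7']), (['A','U','G'],['0','8'])]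
    [(['O','C','T'],['1','0']), (['N','O','V'],['1','1']), (['D','E','C'],['1','2'])]
    rfl
    (by intro kv hkv w; fin_cases hkv <;>
      exact repl_pass _ _ _ _ _ _ _ _ (by decide) (by decide) (by decide))
    (by intro kv hkv w; fin_cases hkv <;>
      exact repl_pass2 _ _ _ _ _ _ _ (by decide) (by decide))
    u

lemma chain_key_OCT (u : List Char) :
    chainR ('O'::'C'::'T'::u) = '1'::'0'::chainR u :=
  chain_key_gen 'O' 'C' 'T' '1' '0'
    [(['J','A','N'],['0','1']), (['F','E','B'],['0','2']), (['M','A','R'],['0','3']), (['A','P','R'],['0','4']), (['M','A','Y'],['0','5']), (['J','U','N'],['0','6']), (['J','U','L'],['0','7']), (['A','U','G'],['0','8']), (['S','E','P'],['0','9'])]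
    [(['N','O','V'],['1','1']), (['D','E','C'],['1','2'])]
    rfl
    (by intro kv hkv w; fin_cases hkv <;>
      exact repl_pass _ _ _ _ _ _ _ _ (by decide) (by decide) (by decide))
    (by intro kv hkv w; fin_cases hkv <;>
      exact repl_pass2 _ _ _ _ _ _ _ (by decide) (by decide))
    u

lemma chain_key_NOV (u : List Char) :
    chainR ('N'::'O'::'V'::u) = '1'::'1'::chainR u :=
  chain_key_gen 'N' 'O' 'V' '1' '1'
    [(['J','A','N'],['0','1']), (['F','E','B'],['0','2']), (['M','A','R'],['0','3']), (['A','P','R'],['0','4']), (['M','A','Y'],['0','5']), (['J','U','N'],['0','6']), (['J','U','L'],['0','7']), (['A','U','G'],['0','8']), (['S','E','P'],['0','9']), (['O','C','T'],['1','0'])]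
    [(['D','E','C'],['1','2'])]
    rfl
    (by intro kv hkv w; fin_cases hkv <;>
      exact repl_pass _ _ _ _ _ _ _ _ (by decide) (by decide) (by decide))
    (by intro kv hkv w; fin_cases hkv <;>
      exact repl_pass2 _ _ _ _ _ _ _ (by decide) (by decide))
    u

lemma chain_key_DEC (u : List Char) :
    chainR ('D'::'E'::'C'::u) = '1'::'2'::chainR u :=
  chain_key_gen 'D' 'E' 'C' '1' '2'
    [(['J','A','N'],['0','1']), (['F','E','B'],['0','2']), (['M','A','R'],['0','3']), (['A','P','R'],['0','4']), (['M','A','Y'],['0','5']), (['J','U','N'],['0','6']), (['J','U','L'],['0','7']), (['A','U','G'],['0','8']), (['S','E','P'],['0','9']), (['O','C','T'],['1','0']), (['N','O','V'],['1','1'])]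
    []
    rfl
    (by intro kv hkv w; fin_cases hkv <;>
      exact repl_pass _ _ _ _ _ _ _ _ (by decide) (by decide) (by decide))
    (by intro kv hkv w; fin_cases hkv <;>
      exact repl_pass2 _ _ _ _ _ _ _ (by decide) (by decide))
    u

lemma scan_cons_of_nkp (c : Char) (t : List Char)
    (h : ∀ kv ∈ monthPairs, ¬ kv.1 <+: c :: t) : scanTok (c::t) = c :: scanTok t := by
  cases t with
  | nil => simp [scanTok]
  | cons c2 t2 =>
    cases t2 with
    | nil => simp [scanTok]
    | cons c3 r =>
      have hmv : monthVal c c2 c3 = none := by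
        cases hmv2 : monthVal c c2 c3 with
        | none => rfl
        | some v =>
          exact absurd (by simp : [c,c2,c3] <+: c::c2::c3::r)
            (h _ (monthVal_some_mem _ _ _ _ hmv2))
      simp [scanTok, hmv]

lemma chain_eq_scan (s : List Char) : chainR s = scanTok s := by
  have main : ∀ (n : Nat) (s : List Char), s.length ≤ n → chainR s = scanTok s := by
    intro n
    induction n with
    | zero =>
      intro s hs
      have hnil : s = [] := by cases s <;> simp_all
      subst hnil
      rw [chainR_nil]; simp [scanTok]
    | succ n ih =>
      intro s hs
      cases s with
      | nil => rw [chainR_nil]; simp [scanTok]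
      | cons c t =>
        by_cases hkey : ∃ kv ∈ monthPairs, kv.1 <+: c :: t
        · obtain ⟨kv, hm, hp⟩ := hkey
          fin_cases hm <;>
          · obtain ⟨u, hu⟩ := hp
            simp only [] at hu
            injection hu with h1 h2
            subst h1; subst h2
            simp at hs
            simp only [List.append_eq, List.cons_append, List.nil_append]
            first
              | (rw [chain_key_JAN u, ih u (by omega)]
                 have hmv : monthVal 'J' 'A' 'N' = some ['0','1'] := by decide
                 simp [scanTok, hmv])
              | (rw [chain_key_FEB u, ih u (by omega)]
                 have hmv : monthVal 'F' 'E' 'B' = some ['0','2'] := by decide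
                 simp [scanTok, hmv])
              | (rw [chain_key_MAR u, ih u (by omega)]
                 have hmv : monthVal 'M' 'A' 'R' = some ['0','3'] := by decide
                 simp [scanTok, hmv])
              | (rw [chain_key_APR u, ih u (by omega)]
                 have hmv : monthVal 'A' 'P' 'R' = some ['0','4'] := by decide
                 simp [scanTok, hmv])
              | (rw [chain_key_MAY u, ih u (by omega)]
                 have hmv : monthVal 'M' 'A' 'Y' = some ['0','5'] := by decide
                 simp [scanTok, hmv])
              | (rw [chain_key_JUN u, ih u (by omega)]
                 have hmv : monthVal 'J' 'U' 'N' = some ['0','6'] := by decide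
                 simp [scanTok, hmv])
              | (rw [chain_key_JUL u, ih u (by omega)]
                 have hmv : monthVal 'J' 'U' 'L' = some ['0','7'] := by decide
                 simp [scanTok, hmv])
              | (rw [chain_key_AUG u, ih u (by omega)]
                 have hmv : monthVal 'A' 'U' 'G' = some ['0','8'] := by decide
                 simp [scanTok, hmv])
              | (rw [chain_key_SEP u, ih u (by omega)]
                 have hmv : monthVal 'S' 'E' 'P' = some ['0','9'] := by decide
                 simp [scanTok, hmv])
              | (rw [chain_key_OCT u, ih u (by omega)]
                 have hmv : monthVal 'O' 'C' 'T' = some ['1','0'] := by decide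
                 simp [scanTok, hmv])
              | (rw [chain_key_NOV u, ih u (by omega)]
                 have hmv : monthVal 'N' 'O' 'V' = some ['1','1'] := by decide
                 simp [scanTok, hmv])
              | (rw [chain_key_DEC u, ih u (by omega)]
                 have hmv : monthVal 'D' 'E' 'C' = some ['1','2'] := by decide
                 simp [scanTok, hmv])
        · push_neg at hkey
          have e := foldl_cons c monthPairs (fun kv h => h) t hkey
          have e2 : chainR (c :: t) = c :: chainR t := e
          rw [e2, scan_cons_of_nkp c t hkey, ih t (by simp at hs; omega)]
  exact main s.length s le_rfl

-- structural model of str.split(' ')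
def splitSp : List Char → List (List Char)
  | [] => [[]]
  | c :: t =>
    match splitSp t with
    | [] => [[c]]
    | h :: rs => if c = ' ' then [] :: h :: rs else (c :: h) :: rs

lemma splitSp_ne_nil (s : List Char) : splitSp s ≠ [] := by
  induction s with
  | nil => simp [splitSp]
  | cons c t ih =>
    rw [splitSp]
    cases h : splitSp t with
    | nil => simp
    | cons hd rs => by_cases hc : c = ' ' <;> simp [hc]

def consHead (x : List Char) : List (List Char) → List (List Char)
  | [] => [x]
  | h :: t => (x ++ h) :: t

lemma splitOn_go_eq :
    ∀ (fuel : Nat) (l cur : List Char) (accs : List (List Char)), l.length ≤ fuel →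
      PySem.Chars.splitOn.go [' '] fuel l cur accs
        = accs.reverse ++ consHead cur.reverse (splitSp l) := by
  intro fuel
  induction fuel with
  | zero =>
    intro l cur accs hl
    have : l = [] := by cases l <;> simp_all
    subst this
    rw [PySem.Chars.splitOn.go.eq_def]
    simp [splitSp, consHead]
  | succ f ih =>
    intro l cur accs hl
    cases l with
    | nil =>
      rw [PySem.Chars.splitOn.go.eq_def]
      simp [splitSp, consHead]
    | cons c rest =>
      rw [PySem.Chars.splitOn.go.eq_def]
      by_cases hc : c = ' '
      · subst hc
        have hp : [' '].isPrefixOf (' ' :: rest) = true := by simp [List.isPrefixOf]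
        simp only [hp, if_true, List.length_cons, List.length_nil, List.drop_succ_cons,
          List.drop_zero]
        rw [ih rest [] ((cur.reverse) :: accs) (by simp at hl ⊢; omega)]
        obtain ⟨h, rs, hsp⟩ : ∃ h rs, splitSp rest = h :: rs := by
          cases hsp : splitSp rest with
          | nil => exact absurd hsp (splitSp_ne_nil rest)
          | cons h rs => exact ⟨h, rs, rfl⟩
        rw [splitSp, hsp]
        simp [consHead]
      · have hp : [' '].isPrefixOf (c :: rest) = false := by
          simp [List.isPrefixOf]; exact fun h => absurd h.symm hc
        simp only [hp, Bool.false_eq_true, if_false]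
        rw [ih rest (c :: cur) accs (by simp at hl ⊢; omega)]
        obtain ⟨h, rs, hsp⟩ : ∃ h rs, splitSp rest = h :: rs := by
          cases hsp : splitSp rest with
          | nil => exact absurd hsp (splitSp_ne_nil rest)
          | cons h rs => exact ⟨h, rs, rfl⟩
        rw [splitSp, hsp]
        simp [consHead, hc]

lemma splitOn_eq_splitSp (s : List Char) : PySem.Chars.splitOn s [' '] = splitSp s := by
  rw [PySem.Chars.splitOn]
  rw [splitOn_go_eq (s.length + 1) s [] [] (by omega)]
  obtain ⟨h, rs, hsp⟩ : ∃ h rs, splitSp s = h :: rs := by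
    cases hsp : splitSp s with
    | nil => exact absurd hsp (splitSp_ne_nil s)
    | cons h rs => exact ⟨h, rs, rfl⟩
  rw [hsp]
  simp [consHead]

lemma splitSp_cons (c : Char) (t : List Char) (h : List Char) (rs : List (List Char))
    (hsp : splitSp t = h :: rs) :
    splitSp (c :: t) = if c = ' ' then [] :: h :: rs else (c :: h) :: rs := by
  rw [splitSp.eq_def]
  simp only [hsp]

lemma monthPairs_facts : ∀ kv ∈ monthPairs,
    ∃ k1 k2 k3 v0 v1, kv = (([k1,k2,k3] : List Char), ([v0,v1] : List Char)) ∧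
      k1 ≠ ' ' ∧ k2 ≠ ' ' ∧ k3 ≠ ' ' ∧ v0 ≠ ' ' ∧ v1 ≠ ' ' := by
  intro kv h
  fin_cases h <;>
    exact ⟨_,_,_,_,_, rfl, by decide, by decide, by decide, by decide, by decide⟩

lemma scanTok_cons3_none (c1 c2 c3 : Char) (g : List Char)
    (hmv : monthVal c1 c2 c3 = none) :
    scanTok (c1 :: c2 :: c3 :: g) = c1 :: scanTok (c2 :: c3 :: g) := by
  rw [scanTok, hmv]

lemma scanTok_cons3_some (c1 c2 c3 : Char) (v g : List Char)
    (hmv : monthVal c1 c2 c3 = some v) :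
    scanTok (c1 :: c2 :: c3 :: g) = v ++ scanTok g := by
  rw [scanTok, hmv]

lemma splitSp_surf (t : List Char) : ∃ g gs, splitSp t = g :: gs := by
  cases hsp : splitSp t with
  | nil => exact absurd hsp (splitSp_ne_nil t)
  | cons g gs => exact ⟨g, gs, rfl⟩

lemma scan_splitSp (s : List Char) : splitSp (scanTok s) = (splitSp s).map scanTok := by
  induction s using scanTok.induct with
  | case1 c1 c2 c3 rest v hmv ih =>
    have hmem := monthVal_some_mem _ _ _ _ hmv
    obtain ⟨k1,k2,k3,v0,v1,hkv,hk1,hk2,hk3,hv0,hv1⟩ := monthPairs_facts _ hmem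
    have hk : [c1,c2,c3] = [k1,k2,k3] := congrArg Prod.fst hkv
    have hv : v = [v0,v1] := congrArg Prod.snd hkv
    obtain ⟨g, gs, hsp⟩ := splitSp_surf rest
    obtain ⟨hc1, hc2, hc3⟩ : c1 = k1 ∧ c2 = k2 ∧ c3 = k3 := by
      have := hk; simp at this; exact ⟨this.1, this.2.1, this.2.2⟩
    subst hc1; subst hc2; subst hc3; subst hv
    obtain ⟨g', gs', hsp'⟩ := splitSp_surf (scanTok rest)
    rw [scanTok_cons3_some _ _ _ _ _ hmv]
    rw [show ([v0,v1] : List Char) ++ scanTok rest = v0 :: v1 :: scanTok rest from rfl]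
    have HL1 : splitSp (v1 :: scanTok rest) = (v1 :: g') :: gs' := by
      rw [splitSp_cons v1 _ _ _ hsp', if_neg hv1]
    rw [splitSp_cons v0 _ _ _ HL1, if_neg hv0]
    have H2 : splitSp (c3 :: rest) = (c3 :: g) :: gs := by
      rw [splitSp_cons c3 _ _ _ hsp, if_neg hk3]
    have H1 : splitSp (c2 :: c3 :: rest) = (c2 :: c3 :: g) :: gs := by
      rw [splitSp_cons c2 _ _ _ H2, if_neg hk2]
    rw [splitSp_cons c1 _ _ _ H1, if_neg hk1]
    rw [ih, hsp] at hsp'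
    simp only [List.map_cons] at hsp'
    obtain ⟨hg', hgs'⟩ := List.cons.inj hsp'
    simp only [List.map_cons]
    have hsc : scanTok (c1 :: c2 :: c3 :: g) = v0 :: v1 :: scanTok g := by
      rw [scanTok_cons3_some _ _ _ _ _ hmv]; rfl
    rw [hsc, ← hg', ← hgs']
  | case2 c1 c2 c3 rest hmv ih =>
    rw [scanTok_cons3_none _ _ _ _ hmv]
    obtain ⟨g, gs, hsp⟩ := splitSp_surf (c2 :: c3 :: rest)
    obtain ⟨g', gs', hsp'⟩ := splitSp_surf (scanTok (c2 :: c3 :: rest))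
    have hsp'' := hsp'
    rw [ih, hsp] at hsp''
    simp only [List.map_cons] at hsp''
    obtain ⟨hg', hgs'⟩ := List.cons.inj hsp''
    by_cases h1 : c1 = ' '
    · rw [splitSp_cons c1 _ _ _ hsp', if_pos h1]
      rw [splitSp_cons c1 _ _ _ hsp, if_pos h1]
      simp only [List.map_cons]
      rw [← hg', ← hgs']
      rfl
    · rw [splitSp_cons c1 _ _ _ hsp', if_neg h1]
      rw [splitSp_cons c1 _ _ _ hsp, if_neg h1]
      simp only [List.map_cons]
      have hgshape : g = [] ∨ g = [c2] ∨ ∃ gr, g = c2 :: c3 :: gr := by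
        obtain ⟨gg, ggs, hspc3⟩ := splitSp_surf (c3 :: rest)
        by_cases h2 : c2 = ' '
        · left
          rw [splitSp_cons c2 _ _ _ hspc3, if_pos h2] at hsp
          exact (List.cons.inj hsp).1.symm
        · rw [splitSp_cons c2 _ _ _ hspc3, if_neg h2] at hsp
          obtain ⟨hg, -⟩ := List.cons.inj hsp
          obtain ⟨g3, gs3, hspr⟩ := splitSp_surf rest
          by_cases h3 : c3 = ' '
          · right; left
            rw [splitSp_cons c3 _ _ _ hspr, if_pos h3] at hspc3
            obtain ⟨hgg, -⟩ := List.cons.inj hspc3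
            rw [← hg, ← hgg]
          · right; right
            rw [splitSp_cons c3 _ _ _ hspr, if_neg h3] at hspc3
            obtain ⟨hgg, -⟩ := List.cons.inj hspc3
            exact ⟨g3, by rw [← hg, ← hgg]⟩
      have hsc : scanTok (c1 :: g) = c1 :: scanTok g := by
        rcases hgshape with h | h | ⟨gr, h⟩ <;> subst h
        · simp [scanTok]
        · simp [scanTok]
        · rw [scanTok_cons3_none _ _ _ _ hmv]
      rw [hsc, ← hg', ← hgs']
  | case3 l hl =>
    match l, hl with
    | [], _ => simp [scanTok, splitSp]
    | [x], _ =>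
      by_cases hx : x = ' ' <;> simp [scanTok, splitSp, hx]
    | [x,y], _ =>
      by_cases hx : x = ' ' <;> by_cases hy : y = ' ' <;>
        simp [scanTok, splitSp, hx, hy]
    | x :: y :: z :: r, hl => exact absurd rfl (hl x y z r)

lemma fold_tok (f : List Char → List Char) :
    ∀ (toks : List (List Char)) (acc : List Char),
      toks.foldl (fun a t => a ++ f t ++ ['.',' ']) acc
        = acc ++ (toks.map (fun t => f t ++ ['.',' '])).flatten := by
  intro toks
  induction toks with
  | nil => intro acc; simp
  | cons t ts ih =>
    intro acc
    simp only [List.foldl_cons, List.map_cons, List.flatten_cons]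
    rw [ih]
    simp [List.append_assoc]

lemma flatten_join (f : List Char → List Char) (l : List (List Char)) (hl : l ≠ []) :
    (l.map (fun t => f t ++ ['.',' '])).flatten
      = PySem.Chars.join ['.',' '] (l.map f) ++ ['.',' '] := by
  induction l with
  | nil => exact absurd rfl hl
  | cons t ts ih =>
    cases ts with
    | nil => simp [PySem.Chars.join, List.intercalate]
    | cons t2 r =>
      simp only [List.map_cons, List.flatten_cons] at ih ⊢
      rw [ih (by simp)]
      rw [PySem.Chars.join_cons_cons]
      simp [List.append_assoc]

lemma lstrip_dotspace (X : List Char) :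
    PySem.Chars.lstrip (X ++ ['.',' ']) = PySem.Chars.lstrip X ++ ['.',' '] := by
  rw [PySem.Chars.lstrip, PySem.Chars.lstrip, List.dropWhile_append]
  split_ifs with h
  · simp only [List.isEmpty_iff] at h
    rw [h]
    simp [PySem.Chars.isspace]
  · rfl

lemma strip_dotspace (X : List Char) :
    PySem.Chars.strip (X ++ ['.',' ']) = PySem.Chars.lstrip X ++ ['.'] := by
  rw [PySem.Chars.strip, lstrip_dotspace]
  rw [PySem.Chars.rstrip]
  rw [show (PySem.Chars.lstrip X ++ ['.',' ']).reverse = ' ' :: '.' :: (PySem.Chars.lstrip X).reverse by simp]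
  rw [List.dropWhile_cons]
  simp [PySem.Chars.isspace]

lemma stripChars_dot (Y : List Char) :
    PySem.Chars.stripChars (Y ++ ['.']) ['.'] = PySem.Chars.stripChars Y ['.'] := by
  rw [PySem.Chars.stripChars, PySem.Chars.stripChars]
  rw [List.dropWhile_append]
  split_ifs with h
  · simp only [List.isEmpty_iff] at h
    rw [h]
    simp
  · rw [show (List.dropWhile (fun c => List.contains ['.'] c) Y ++ ['.']).reverse
        = '.' :: (List.dropWhile (fun c => List.contains ['.'] c) Y).reverse by simp]
    rw [List.dropWhile_cons]
    simp

-- ===== VERDICT (by name: the statement is the Claim_ definition above) =====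
theorem alias_month_spec : Claim_equal_alias_month := by
  intro s _
  show alias_month s = alias_month_alt s
  rw [alias_month, alias_month_alt]
  simp only [chainA_eq_chainR, chain_eq_scan, splitOn_eq_splitSp, scan_splitSp]
  rw [fold_tok (fun t => if t.length == 1 && pyIsnumeric t then '0' :: t else t) _ []]
  rw [flatten_join (fun t => if t.length == 1 && pyIsnumeric t then '0' :: t else t) _
      (by simp [splitSp_ne_nil])]
  rw [List.nil_append, strip_dotspace, stripChars_dot]
  rw [List.map_map]
  simp only [pyIsnumeric]
  congr 1
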